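-- pv_equiv track=rewrite | github.com/benrich37/perlStuff | helpers/generic_helpers.py | get_sort_bool
-- ===== SOURCE A (Python) =====
-- def get_sort_bool(symbols):
--     ats = []
--     dones = []
--     for a in symbols:
--         if a not in ats:
--             ats.append(a)
--         elif a in dones:
--             return True
--         for at in ats:
--             if at not in dones:
--                 if at != a:
--                     dones.append(at)
--     return False
-- ===== SOURCE B (Python) =====
-- def get_sort_bool(symbols):
--     # One pass over runs: when the current run ends, its symbol is "finished";
--     # seeing a finished symbol again means its occurrences are non-contiguous.
--     finished = set()
--     cur = None
--     for i, a in enumerate(symbols):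
--         if i == 0:
--             cur = a
--         elif a != cur:
--             if a in finished:
--                 return True
--             finished.add(cur)
--             cur = a
--     return False
-- ===== Notes on version B (the rewrite author's own statement) =====
-- stated objective: faster
-- what changed: Replaced A's per-element membership scans plus inner rescan of all seen symbols with a single pass over runs that keeps only the current run symbol and a set of finished symbols.
import Mathlib
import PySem

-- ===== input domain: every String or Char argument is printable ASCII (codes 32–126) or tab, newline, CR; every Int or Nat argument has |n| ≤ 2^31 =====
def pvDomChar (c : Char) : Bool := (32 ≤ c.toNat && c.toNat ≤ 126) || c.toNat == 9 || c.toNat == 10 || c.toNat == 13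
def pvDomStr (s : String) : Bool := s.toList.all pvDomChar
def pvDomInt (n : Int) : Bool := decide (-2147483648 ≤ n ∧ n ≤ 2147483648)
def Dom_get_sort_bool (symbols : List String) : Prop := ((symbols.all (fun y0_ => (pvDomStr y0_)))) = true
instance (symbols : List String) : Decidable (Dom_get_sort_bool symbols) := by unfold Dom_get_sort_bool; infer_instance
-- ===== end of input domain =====

-- B replaces A's quadratic-per-step rescans with one pass over runs and a set of finished symbols (faster, asymptotic).

-- ===== PORT A =====
-- inner 'for at in ats: if at not in dones: if at != a: dones.append(at)'
def gsbInner (a : String) (ats dones : List String) : List String :=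
  ats.foldl (fun d at_ => if at_ ∈ d then d else if at_ ≠ a then d ++ [at_] else d) dones

-- outer 'for a in symbols' with early return
def gsbLoopA : List String → List String → List String → Bool
  | [], _, _ => false
  | a :: rest, ats, dones =>
    if a ∉ ats then
      gsbLoopA rest (ats ++ [a]) (gsbInner a (ats ++ [a]) dones)
    else if a ∈ dones then true
    else gsbLoopA rest ats (gsbInner a ats dones)

def get_sort_bool (symbols : List String) : Bool := gsbLoopA symbols [] []

-- ===== PORT B =====
def gsbLoopB : List String → String → PySem.Set String → Bool
  | [], _, _ => false
  | a :: rest, cur, finished =>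
    if a ≠ cur then
      if a ∈ finished then true
      else gsbLoopB rest a (PySem.Set.add finished cur)
    else gsbLoopB rest cur finished

def get_sort_bool_alt (symbols : List String) : Bool :=
  match symbols with
  | [] => false
  | a :: rest => gsbLoopB rest a PySem.Set.empty

-- ===== PRECONDITION & SPEC =====
def Spec_get_sort_bool (symbols : List String) (out : Bool) : Prop := out = get_sort_bool_alt symbols
instance (symbols : List String) (out : Bool) : Decidable (Spec_get_sort_bool symbols out) := by unfold Spec_get_sort_bool; infer_instance

-- ===== CLAIM (what is proved, stated in full; the proofs are below) =====
def Claim_equal_get_sort_bool : Prop := ∀ (symbols : List String), Dom_get_sort_bool symbols → Spec_get_sort_bool symbols (get_sort_bool symbols)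

-- ===== LEMMAS AND PROOFS =====

lemma mem_gsbInner (a x : String) (ats dones : List String) :
    x ∈ gsbInner a ats dones ↔ x ∈ dones ∨ (x ∈ ats ∧ x ≠ a) := by
  unfold gsbInner
  induction ats generalizing dones with
  | nil => simp
  | cons at_ rest ih =>
    simp only [List.foldl_cons]
    by_cases h1 : at_ ∈ dones
    · rw [if_pos h1, ih]
      have hsub : x = at_ → x ∈ dones := fun h => h ▸ h1
      simp only [List.mem_cons]
      tauto
    · by_cases h2 : at_ = a
      · subst h2
        rw [if_neg h1, if_neg (by simp), ih]
        simp only [List.mem_cons]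
        tauto
      · rw [if_neg h1, if_pos h2, ih]
        have hsub : x = at_ → x ≠ a := fun h => h ▸ h2
        simp only [List.mem_append, List.mem_cons]
        tauto

-- the joint loop invariant: membership in dones is "distinct seen except the current symbol",
-- and finished agrees with dones as a set
lemma gsb_loops_eq (rest : List String) :
    ∀ (cur : String) (ats dones : List String) (finished : PySem.Set String),
      cur ∈ ats → cur ∉ dones →
      (∀ x, x ∈ dones ↔ x ∈ ats ∧ x ≠ cur) →
      (∀ x, x ∈ finished ↔ x ∈ dones) →
      gsbLoopA rest ats dones = gsbLoopB rest cur finished := by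
  induction rest with
  | nil => intros; simp [gsbLoopA, gsbLoopB]
  | cons a rest ih =>
    intro cur ats dones finished hcur hcd hinv hfin
    simp only [gsbLoopA, gsbLoopB]
    by_cases hmem : a ∈ ats
    · simp only [hmem, not_true, if_false, ite_not]
      by_cases hdone : a ∈ dones
      · -- A returns True; B: a ≠ cur and a ∈ finished
        have hne : a ≠ cur := ((hinv a).mp hdone).2
        simp [hdone, hne, (hfin a).mpr hdone]
      · -- a ∈ ats, a ∉ dones ⇒ a = cur; inner loop is a no-op on membership
        have heq : a = cur := by
          by_contra h
          exact hdone ((hinv a).mpr ⟨hmem, h⟩)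
        subst heq
        simp only [hdone, if_false]
        apply ih a ats (gsbInner a ats dones) finished hcur
        · intro h
          rcases (mem_gsbInner a a ats dones).mp h with h | ⟨_, h⟩
          · exact hcd h
          · exact h rfl
        · intro x
          rw [mem_gsbInner]
          constructor
          · rintro (h | ⟨h, hne⟩)
            · exact hinv x |>.mp h
            · exact ⟨h, hne⟩
          · intro h; exact Or.inr h
        · intro x
          rw [hfin, mem_gsbInner]
          constructor
          · intro h; exact Or.inl h
          · rintro (h | ⟨h, hne⟩)
            · exact h
            · exact (hinv x).mpr ⟨h, hne⟩
    · -- new symbol: a ∉ ats, so a ≠ cur, a ∉ finished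
      have hne : a ≠ cur := fun h => hmem (h ▸ hcur)
      have hafin : a ∉ finished := fun h => hmem ((hinv a).mp ((hfin a).mp h)).1
      rw [if_pos hmem, if_pos hne, if_neg hafin]
      apply ih a (ats ++ [a]) (gsbInner a (ats ++ [a]) dones) (PySem.Set.add finished cur)
      · simp
      · intro h
        rcases (mem_gsbInner a a (ats ++ [a]) dones).mp h with h | ⟨_, h⟩
        · exact hmem ((hinv a).mp h).1
        · exact h rfl
      · intro x
        rw [mem_gsbInner]
        constructor
        · rintro (h | ⟨h, hne'⟩)
          · have := (hinv x).mp h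
            exact ⟨List.mem_append_left _ this.1, fun hx => hmem (hx ▸ this.1)⟩
          · exact ⟨h, hne'⟩
        · rintro ⟨h, hne'⟩
          rcases List.mem_append.mp h with h | h
          · exact Or.inr ⟨List.mem_append_left _ h, hne'⟩
          · simp at h; exact absurd h hne'
      · intro x
        rw [PySem.Set.mem_add, mem_gsbInner, hfin]
        constructor
        · rintro (h | rfl)
          · exact Or.inl h
          · exact Or.inr ⟨List.mem_append_left _ hcur, fun h => hne h.symm⟩
        · rintro (h | ⟨h, hne'⟩)
          · exact Or.inl h
          · by_cases hx : x = cur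
            · exact Or.inr hx
            · left
              rcases List.mem_append.mp h with h | h
              · exact (hinv x).mpr ⟨h, hx⟩
              · simp at h; exact absurd h hne'

-- ===== VERDICT (by name: the statement is the Claim_ definition above) =====
theorem get_sort_bool_spec : Claim_equal_get_sort_bool := by
  intro symbols _
  unfold Spec_get_sort_bool get_sort_bool get_sort_bool_alt
  match symbols with
  | [] => rfl
  | a :: rest =>
    have h0 : gsbInner a ([] ++ [a]) [] = [] := by simp [gsbInner]
    simp only [gsbLoopA]
    rw [if_pos (List.not_mem_nil), h0, List.nil_append]
    exact gsb_loops_eq rest a [a] [] PySem.Set.empty (by simp) (by simp)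
      (fun x => by simp) (fun x => by simp [PySem.Set.empty])
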